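-- pv_equiv track=rewrite | github.com/modularizer/termite | src/termite/strip.py | _filter_sgr_params
-- ===== SOURCE A (Python) =====
-- from typing import List
--
-- FG_CODES = {
--     30, 31, 32, 33, 34, 35, 36, 37, 39,
--     90, 91, 92, 93, 94, 95, 96, 97,
-- }
--
-- BG_CODES = {
--     40, 41, 42, 43, 44, 45, 46, 47, 49,
--     100, 101, 102, 103, 104, 105, 106, 107,
-- }
--
-- STYLE_CODES = {
--     1, 2, 3, 4, 5, 7, 8, 9,
--     21, 22, 23, 24, 25, 27, 28, 29,
--     51, 52, 53, 54, 55,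
-- }
--
-- EXT_COLOR_CODES = {38, 48, 58}
--
-- def _filter_sgr_params(
--         params: List[int],
--         remove_fg_colors: bool,
--         remove_bg_colors: bool,
--         remove_styles: bool,
--         remove_reset: bool,
-- ) -> List[int]:
--     """
--     Filter SGR param list according to flags.
--     Handles basic colors, styles, and extended colors (38/48/58).
--     """
--     kept: List[int] = []
--     i = 0
--     n = len(params)
--
--     while i < n:
--         p = params[i]
--
--         # Reset
--         if p == 0:
--             if not remove_reset:
--                 kept.append(p)
--             i += 1
--             continue
--
--         # Styles (bold, underline, etc.)
--         if p in STYLE_CODES: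
--             if not remove_styles:
--                 kept.append(p)
--             i += 1
--             continue
--
--         # Simple foreground
--         if p in FG_CODES:
--             if not remove_fg_colors:
--                 kept.append(p)
--             i += 1
--             continue
--
--         # Simple background
--         if p in BG_CODES:
--             if not remove_bg_colors:
--                 kept.append(p)
--             i += 1
--             continue
--
--         # Extended color (38/48/58)
--         if p in EXT_COLOR_CODES:
--             # figure out sequence length: 38;5;n or 38;2;r;g;b
--             mode = params[i + 1] if i + 1 < n else None
--             if mode == 5:
--                 seq_len = 3  # p, 5, n
--             elif mode == 2:
--                 seq_len = 5  # p, 2, r, g, b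
--             else:
--                 # malformed / unknown; just treat as single param
--                 seq_len = 1
--
--             # decide whether to remove this whole extended-color sequence
--             if p == 38:  # fg
--                 remove_this = remove_fg_colors
--             elif p == 48:  # bg
--                 remove_this = remove_bg_colors
--             else:  # 58: underline color; treat as a "style color"
--                 remove_this = remove_styles
--
--             if not remove_this:
--                 kept.extend(params[i : i + seq_len])
--
--             i += seq_len
--             continue
--
--         # Unknown param -> keep
--         kept.append(p)
--         i += 1
--
--     return kept
-- ===== SOURCE B (Python) =====
-- FG_CODES = {
--     30, 31, 32, 33, 34, 35, 36, 37, 39,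
--     90, 91, 92, 93, 94, 95, 96, 97,
-- }
--
-- BG_CODES = {
--     40, 41, 42, 43, 44, 45, 46, 47, 49,
--     100, 101, 102, 103, 104, 105, 106, 107,
-- }
--
-- STYLE_CODES = {
--     1, 2, 3, 4, 5, 7, 8, 9,
--     21, 22, 23, 24, 25, 27, 28, 29,
--     51, 52, 53, 54, 55,
-- }
--
--
-- def _segments(params):
--     """Tokenize a param list into SGR segments (extended colors grouped)."""
--     segs = []
--     i = 0
--     n = len(params)
--     while i < n:
--         p = params[i]
--         if p in (38, 48, 58):
--             nxt = params[i + 1] if i + 1 < n else None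
--             length = 3 if nxt == 5 else 5 if nxt == 2 else 1
--             segs.append(params[i:i + length])
--             i += length
--         else:
--             segs.append([p])
--             i += 1
--     return segs
--
--
-- def _filter_sgr_params(params, remove_fg_colors, remove_bg_colors,
--                        remove_styles, remove_reset):
--     def keep(seg):
--         p = seg[0]
--         if p == 38:
--             return not remove_fg_colors
--         if p == 48:
--             return not remove_bg_colors
--         if p == 58:
--             return not remove_styles
--         if p == 0:
--             return not remove_reset
--         if p in STYLE_CODES:
--             return not remove_styles
--         if p in FG_CODES:
--             return not remove_fg_colors
--         if p in BG_CODES: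
--             return not remove_bg_colors
--         return True
--
--     return [x for seg in _segments(params) if keep(seg) for x in seg]
-- ===== Notes on version B (the rewrite author's own statement) =====
-- stated objective: alternative
-- what changed: B replaces A's single index-driven while loop with inline decisions by a two-phase decomposition: tokenize the params into segments (grouping 38/48/58 extended-color sequences), then filter the segments by category and flatten the kept ones.
import Mathlib
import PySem

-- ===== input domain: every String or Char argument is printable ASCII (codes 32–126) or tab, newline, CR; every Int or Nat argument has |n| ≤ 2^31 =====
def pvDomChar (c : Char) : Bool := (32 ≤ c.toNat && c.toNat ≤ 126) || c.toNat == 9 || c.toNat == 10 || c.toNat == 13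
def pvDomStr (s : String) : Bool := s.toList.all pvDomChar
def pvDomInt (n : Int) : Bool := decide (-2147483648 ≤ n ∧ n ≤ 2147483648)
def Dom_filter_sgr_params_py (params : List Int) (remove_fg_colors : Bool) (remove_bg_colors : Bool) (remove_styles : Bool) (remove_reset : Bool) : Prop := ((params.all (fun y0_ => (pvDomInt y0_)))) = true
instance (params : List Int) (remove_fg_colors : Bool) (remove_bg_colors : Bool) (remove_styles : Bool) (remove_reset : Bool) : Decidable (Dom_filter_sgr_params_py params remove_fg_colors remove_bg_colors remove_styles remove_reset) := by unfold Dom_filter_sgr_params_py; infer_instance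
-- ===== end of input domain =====

-- B replaces A's single index-driven loop with a tokenize-into-segments pass followed by
-- a filter-and-flatten pass (alternative decomposition, same cost); return value only.

-- ===== PORT A =====
def pvFgCodes : List Int := [30, 31, 32, 33, 34, 35, 36, 37, 39, 90, 91, 92, 93, 94, 95, 96, 97]
def pvBgCodes : List Int := [40, 41, 42, 43, 44, 45, 46, 47, 49, 100, 101, 102, 103, 104, 105, 106, 107]
def pvStyleCodes : List Int := [1, 2, 3, 4, 5, 7, 8, 9, 21, 22, 23, 24, 25, 27, 28, 29, 51, 52, 53, 54, 55]
def pvExtColorCodes : List Int := [38, 48, 58]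

-- the while loop of A: state (kept, i), decreasing on params.length - i
def filterA_loop (params : List Int) (remove_fg_colors remove_bg_colors remove_styles remove_reset : Bool)
    (kept : List Int) (i : Nat) : List Int :=
  if h : i < params.length then
    let p := params[i]
    if p = 0 then
      filterA_loop params remove_fg_colors remove_bg_colors remove_styles remove_reset
        (if !remove_reset then kept ++ [p] else kept) (i + 1)
    else if p ∈ pvStyleCodes then
      filterA_loop params remove_fg_colors remove_bg_colors remove_styles remove_reset
        (if !remove_styles then kept ++ [p] else kept) (i + 1)
    else if p ∈ pvFgCodes then
      filterA_loop params remove_fg_colors remove_bg_colors remove_styles remove_reset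
        (if !remove_fg_colors then kept ++ [p] else kept) (i + 1)
    else if p ∈ pvBgCodes then
      filterA_loop params remove_fg_colors remove_bg_colors remove_styles remove_reset
        (if !remove_bg_colors then kept ++ [p] else kept) (i + 1)
    else if p ∈ pvExtColorCodes then
      -- mode = params[i + 1] if i + 1 < n else None
      let mode : Option Int := PySem.List.pyGet? params ((i : Int) + 1)
      let seq_len : Nat := if mode = some 5 then 3 else if mode = some 2 then 5 else 1
      let remove_this : Bool :=
        if p = 38 then remove_fg_colors
        else if p = 48 then remove_bg_colors
        else remove_styles
      filterA_loop params remove_fg_colors remove_bg_colors remove_styles remove_reset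
        (if !remove_this then
            kept ++ PySem.List.slice params (some (i : Int)) (some ((i : Int) + (seq_len : Int)))
          else kept)
        (i + seq_len)
    else
      filterA_loop params remove_fg_colors remove_bg_colors remove_styles remove_reset
        (kept ++ [p]) (i + 1)
  else kept
termination_by params.length - i
decreasing_by all_goals first | omega | (split_ifs <;> omega)

def filter_sgr_params_py (params : List Int) (remove_fg_colors : Bool) (remove_bg_colors : Bool) (remove_styles : Bool) (remove_reset : Bool) : List Int :=
  filterA_loop params remove_fg_colors remove_bg_colors remove_styles remove_reset [] 0

-- ===== PORT B =====
-- tokenize params into segments, grouping extended-color (38/48/58) sequences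
def sgrSegments (params : List Int) (i : Nat) : List (List Int) :=
  if h : i < params.length then
    let p := params[i]
    if p = 38 ∨ p = 48 ∨ p = 58 then
      -- nxt = params[i + 1] if i + 1 < n else None
      let nxt : Option Int := PySem.List.pyGet? params ((i : Int) + 1)
      let len : Nat := if nxt = some 5 then 3 else if nxt = some 2 then 5 else 1
      PySem.List.slice params (some (i : Int)) (some ((i : Int) + (len : Int))) ::
        sgrSegments params (i + len)
    else
      [p] :: sgrSegments params (i + 1)
  else []
termination_by params.length - i
decreasing_by all_goals first | omega | (split_ifs <;> omega)

def keepSeg (remove_fg_colors remove_bg_colors remove_styles remove_reset : Bool) (seg : List Int) : Bool :=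
  match seg with
  | [] => true
  | p :: _ =>
    if p = 38 then !remove_fg_colors
    else if p = 48 then !remove_bg_colors
    else if p = 58 then !remove_styles
    else if p = 0 then !remove_reset
    else if p ∈ pvStyleCodes then !remove_styles
    else if p ∈ pvFgCodes then !remove_fg_colors
    else if p ∈ pvBgCodes then !remove_bg_colors
    else true

def filter_sgr_params_py_alt (params : List Int) (remove_fg_colors : Bool) (remove_bg_colors : Bool) (remove_styles : Bool) (remove_reset : Bool) : List Int :=
  ((sgrSegments params 0).filter (keepSeg remove_fg_colors remove_bg_colors remove_styles remove_reset)).flatten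

-- ===== PRECONDITION & SPEC =====
def Spec_filter_sgr_params_py (params : List Int) (remove_fg_colors : Bool) (remove_bg_colors : Bool) (remove_styles : Bool) (remove_reset : Bool) (out : List Int) : Prop := out = filter_sgr_params_py_alt params remove_fg_colors remove_bg_colors remove_styles remove_reset
instance (params : List Int) (remove_fg_colors : Bool) (remove_bg_colors : Bool) (remove_styles : Bool) (remove_reset : Bool) (out : List Int) : Decidable (Spec_filter_sgr_params_py params remove_fg_colors remove_bg_colors remove_styles remove_reset out) := by unfold Spec_filter_sgr_params_py; infer_instance

-- ===== CLAIM (what is proved, stated in full; the proofs are below) =====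
def Claim_equal_filter_sgr_params_py : Prop := ∀ (params : List Int) (remove_fg_colors : Bool) (remove_bg_colors : Bool) (remove_styles : Bool) (remove_reset : Bool), Dom_filter_sgr_params_py params remove_fg_colors remove_bg_colors remove_styles remove_reset → Spec_filter_sgr_params_py params remove_fg_colors remove_bg_colors remove_styles remove_reset (filter_sgr_params_py params remove_fg_colors remove_bg_colors remove_styles remove_reset)

-- ===== LEMMAS AND PROOFS =====

-- shifting a conditional append of a segment out of the accumulator
theorem append_if_seg (kept seg X : List Int) (b : Bool) :
    (if b then kept ++ seg else kept) ++ X = kept ++ ((if b then seg else []) ++ X) := by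
  cases b <;> simp

-- B's filter-and-flatten, unrolled one segment at a time
theorem filter_flatten_cons (K : List Int → Bool) (seg : List Int) (segs : List (List Int)) :
    ((seg :: segs).filter K).flatten =
      (if K seg then seg else []) ++ (segs.filter K).flatten := by
  rw [List.filter_cons]
  split_ifs <;> simp

theorem filterA_loop_eq (params : List Int)
    (rfg rbg rs rr : Bool) :
    ∀ (k i : Nat) (kept : List Int), params.length - i ≤ k →
      filterA_loop params rfg rbg rs rr kept i =
        kept ++ ((sgrSegments params i).filter (keepSeg rfg rbg rs rr)).flatten := by
  intro k
  induction k with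
  | zero =>
    intro i kept hk
    have h : ¬ i < params.length := by omega
    rw [filterA_loop, dif_neg h, sgrSegments, dif_neg h]
    simp
  | succ k ih =>
    intro i kept hk
    by_cases h : i < params.length
    · rw [filterA_loop, dif_pos h]
      set p := params[i] with hp
      by_cases h0 : p = 0
      · have hseg : sgrSegments params i = [p] :: sgrSegments params (i + 1) := by
          rw [sgrSegments, dif_pos h]
          simp [← hp, h0]
        rw [if_pos h0, ih _ _ (by omega), hseg, filter_flatten_cons, append_if_seg]
        have : keepSeg rfg rbg rs rr [p] = !rr := by simp [keepSeg, h0]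
        rw [this]
      · rw [if_neg h0]
        by_cases hst : p ∈ pvStyleCodes
        · have hd : p = 1 ∨ p = 2 ∨ p = 3 ∨ p = 4 ∨ p = 5 ∨ p = 7 ∨ p = 8 ∨ p = 9 ∨
              p = 21 ∨ p = 22 ∨ p = 23 ∨ p = 24 ∨ p = 25 ∨ p = 27 ∨ p = 28 ∨ p = 29 ∨
              p = 51 ∨ p = 52 ∨ p = 53 ∨ p = 54 ∨ p = 55 := by
            simpa [pvStyleCodes] using hst
          have hseg : sgrSegments params i = [p] :: sgrSegments params (i + 1) := by
            rw [sgrSegments, dif_pos h]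
            have hne : ¬(p = 38 ∨ p = 48 ∨ p = 58) := by omega
            simp [← hp, hne]
          rw [if_pos hst, ih _ _ (by omega), hseg, filter_flatten_cons, append_if_seg]
          have : keepSeg rfg rbg rs rr [p] = !rs := by
            simp only [keepSeg]
            rw [if_neg (by omega), if_neg (by omega), if_neg (by omega), if_neg h0, if_pos hst]
          rw [this]
        · rw [if_neg hst]
          by_cases hfg : p ∈ pvFgCodes
          · have hd : p = 30 ∨ p = 31 ∨ p = 32 ∨ p = 33 ∨ p = 34 ∨ p = 35 ∨ p = 36 ∨
                p = 37 ∨ p = 39 ∨ p = 90 ∨ p = 91 ∨ p = 92 ∨ p = 93 ∨ p = 94 ∨ p = 95 ∨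
                p = 96 ∨ p = 97 := by simpa [pvFgCodes] using hfg
            have hseg : sgrSegments params i = [p] :: sgrSegments params (i + 1) := by
              rw [sgrSegments, dif_pos h]
              have hne : ¬(p = 38 ∨ p = 48 ∨ p = 58) := by omega
              simp [← hp, hne]
            rw [if_pos hfg, ih _ _ (by omega), hseg, filter_flatten_cons, append_if_seg]
            have : keepSeg rfg rbg rs rr [p] = !rfg := by
              simp only [keepSeg]
              rw [if_neg (by omega), if_neg (by omega), if_neg (by omega), if_neg h0,
                  if_neg hst, if_pos hfg]
            rw [this]
          · rw [if_neg hfg]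
            by_cases hbg : p ∈ pvBgCodes
            · have hd : p = 40 ∨ p = 41 ∨ p = 42 ∨ p = 43 ∨ p = 44 ∨ p = 45 ∨ p = 46 ∨
                  p = 47 ∨ p = 49 ∨ p = 100 ∨ p = 101 ∨ p = 102 ∨ p = 103 ∨ p = 104 ∨
                  p = 105 ∨ p = 106 ∨ p = 107 := by simpa [pvBgCodes] using hbg
              have hseg : sgrSegments params i = [p] :: sgrSegments params (i + 1) := by
                rw [sgrSegments, dif_pos h]
                have hne : ¬(p = 38 ∨ p = 48 ∨ p = 58) := by omega
                simp [← hp, hne]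
              rw [if_pos hbg, ih _ _ (by omega), hseg, filter_flatten_cons, append_if_seg]
              have : keepSeg rfg rbg rs rr [p] = !rbg := by
                simp only [keepSeg]
                rw [if_neg (by omega), if_neg (by omega), if_neg (by omega), if_neg h0,
                    if_neg hst, if_neg hfg, if_pos hbg]
              rw [this]
            · rw [if_neg hbg]
              by_cases hext : p ∈ pvExtColorCodes
              · have hd : p = 38 ∨ p = 48 ∨ p = 58 := by simpa [pvExtColorCodes] using hext
                rw [if_pos hext]
                have hkeepSlice : ∀ tl : List Int,
                    keepSeg rfg rbg rs rr (p :: tl) =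
                      !(if p = 38 then rfg else if p = 48 then rbg else rs) := by
                  intro tl
                  simp only [keepSeg]
                  rcases hd with hq | hq | hq <;> simp [hq]
                by_cases hm5 : PySem.List.pyGet? params ((i : Int) + 1) = some 5
                · have hseg : sgrSegments params i =
                      PySem.List.slice params (some (i : Int)) (some ((i : Int) + 3)) ::
                        sgrSegments params (i + 3) := by
                    rw [sgrSegments, dif_pos h]
                    simp [← hp, hd, hm5]
                  have hslice : PySem.List.slice params (some (i : Int)) (some ((i : Int) + 3)) =
                      p :: (params.drop (i + 1)).take 2 := by
                    have h3 : ((i : Int) + 3) = ((i : Int) + ((3 : Nat) : Int)) := by norm_num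
                    rw [h3, PySem.List.slice_natCast_add params i 3,
                        List.drop_eq_getElem_cons h]
                    rfl
                  simp only [hm5, reduceIte, Nat.cast_ofNat]
                  rw [ih (i + 3) _ (by omega), hseg, filter_flatten_cons, append_if_seg,
                      hslice, hkeepSlice]
                · by_cases hm2 : PySem.List.pyGet? params ((i : Int) + 1) = some 2
                  · have hseg : sgrSegments params i =
                        PySem.List.slice params (some (i : Int)) (some ((i : Int) + 5)) ::
                          sgrSegments params (i + 5) := by
                      rw [sgrSegments, dif_pos h]
                      simp [← hp, hd, hm2]
                    have hslice : PySem.List.slice params (some (i : Int))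
                        (some ((i : Int) + 5)) = p :: (params.drop (i + 1)).take 4 := by
                      have h5 : ((i : Int) + 5) = ((i : Int) + ((5 : Nat) : Int)) := by norm_num
                      rw [h5, PySem.List.slice_natCast_add params i 5,
                          List.drop_eq_getElem_cons h]
                      rfl
                    have hne25 : ((some (2 : Int)) = some 5) = False := by simp
                    simp only [hm2, hne25, if_false, reduceIte, Nat.cast_ofNat]
                    rw [ih (i + 5) _ (by omega), hseg, filter_flatten_cons, append_if_seg,
                        hslice, hkeepSlice]
                  · have hseg : sgrSegments params i =
                        PySem.List.slice params (some (i : Int)) (some ((i : Int) + 1)) ::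
                          sgrSegments params (i + 1) := by
                      rw [sgrSegments, dif_pos h]
                      simp [← hp, hd, hm5, hm2]
                    have hslice : PySem.List.slice params (some (i : Int))
                        (some ((i : Int) + 1)) = p :: (params.drop (i + 1)).take 0 := by
                      have h1 : ((i : Int) + 1) = ((i : Int) + ((1 : Nat) : Int)) := by norm_num
                      rw [h1, PySem.List.slice_natCast_add params i 1,
                          List.drop_eq_getElem_cons h]
                      rfl
                    simp only [hm5, hm2, reduceIte, Nat.cast_one]
                    rw [ih (i + 1) _ (by omega), hseg, filter_flatten_cons, append_if_seg,
                        hslice, hkeepSlice]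
              · have h38 : ¬(p = 38 ∨ p = 48 ∨ p = 58) := by
                  simpa [pvExtColorCodes] using hext
                have hseg : sgrSegments params i = [p] :: sgrSegments params (i + 1) := by
                  rw [sgrSegments, dif_pos h]
                  simp [← hp, h38]
                rw [if_neg hext, ih _ _ (by omega), hseg, filter_flatten_cons]
                have : keepSeg rfg rbg rs rr [p] = true := by
                  simp only [keepSeg]
                  rw [if_neg (by tauto), if_neg (by tauto), if_neg (by tauto), if_neg h0,
                      if_neg hst, if_neg hfg, if_neg hbg]
                rw [this]
                simp
    · rw [filterA_loop, dif_neg h, sgrSegments, dif_neg h]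
      simp

-- ===== VERDICT (by name: the statement is the Claim_ definition above) =====
theorem filter_sgr_params_py_spec : Claim_equal_filter_sgr_params_py := by
  intro params rfg rbg rs rr _
  unfold Spec_filter_sgr_params_py filter_sgr_params_py filter_sgr_params_py_alt
  simpa using filterA_loop_eq params rfg rbg rs rr params.length 0 [] (by omega)
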